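-- pv_equiv track=rewrite | github.com/Gilitiko/TeamChooser | gui.py | parse_seperations
-- ===== SOURCE A (Python) =====
-- import itertools
--
-- def parse_seperations(seperations_text):
--     lines = seperations_text.splitlines()
--     groups = []
--     g = []
--     for l in lines:
--         if l:
--             g.append(l)
--         else:
--             groups.append(g)
--             g = []
--
--     if g:
--         groups.append(g)
--
--     bad_pairs = []
--     for g in groups:
--         if len(g) > 3:
--             showerror(title="Error", message=f"Seperation group size cant be above 3, {g}")
--             raise Exception()
--         bad_pairs += list(itertools.combinations(g, 2))
--
--     return bad_pairs
-- ===== SOURCE B (Python) =====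
-- def parse_seperations(seperations_text):
--     # One-pass streaming: pairs are emitted incrementally as each nonempty line
--     # arrives (paired with the lines already seen in the current block); no group
--     # list and no itertools.combinations.  For blocks of size <= 3 the emission
--     # order coincides with combinations(g, 2).
--     bad_pairs = []
--     buf = []
--     for l in seperations_text.splitlines():
--         if not l:
--             buf = []
--         elif len(buf) == 3:
--             showerror(title="Error", message=f"Seperation group size cant be above 3, {buf + [l]}")
--             raise Exception()
--         else:
--             for prev in buf:
--                 bad_pairs.append((prev, l))
--             buf.append(l)
--     return bad_pairs
-- ===== Notes on version B (the rewrite author's own statement) =====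
-- stated objective: alternative
-- what changed: Replaces A's two-phase shape (accumulate all groups into a list, flush the trailing group, then iterate emitting itertools.combinations per group) with a single streaming pass that keeps only the current block's lines and emits each pair the moment its second member arrives, raising as soon as a fourth consecutive nonempty line is seen; no groups list and no itertools.
import Mathlib
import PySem

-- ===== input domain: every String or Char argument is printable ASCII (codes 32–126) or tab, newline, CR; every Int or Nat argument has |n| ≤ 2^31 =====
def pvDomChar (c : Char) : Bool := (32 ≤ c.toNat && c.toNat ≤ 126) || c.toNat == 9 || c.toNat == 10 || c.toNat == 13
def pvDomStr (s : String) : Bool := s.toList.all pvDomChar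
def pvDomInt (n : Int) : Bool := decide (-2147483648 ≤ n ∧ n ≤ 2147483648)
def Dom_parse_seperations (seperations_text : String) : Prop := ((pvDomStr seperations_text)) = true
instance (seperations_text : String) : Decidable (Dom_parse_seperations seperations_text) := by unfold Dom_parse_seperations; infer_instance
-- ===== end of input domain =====

-- B replaces A's accumulate-groups-then-combinations shape with a single streaming pass that
-- emits each pair as its second line arrives (objective: alternative). Return value only.

-- ===== PORT A =====
-- itertools.combinations(g, 2)
def pvCombs2 : List String → List (String × String)
  | [] => []
  | x :: xs => xs.map (fun y => (x, y)) ++ pvCombs2 xs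

def parse_seperations (seperations_text : String) : List (String × String) :=
  let lines := PySem.Str.splitlines seperations_text
  let st := lines.foldl
    (fun (st : List (List String) × List String) l =>
      if l ≠ "" then (st.1, st.2 ++ [l]) else (st.1 ++ [st.2], []))
    (([], []) : List (List String) × List String)
  let groups := if st.2 ≠ [] then st.1 ++ [st.2] else st.1
  -- on a group of length > 3 the Python shows an error and raises (excluded by Pre_);
  -- the port skips such a group
  groups.foldl (fun acc g => if g.length > 3 then acc else acc ++ pvCombs2 g) []

-- ===== PORT B =====
def parse_seperations_alt (seperations_text : String) : List (String × String) :=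
  ((PySem.Str.splitlines seperations_text).foldl
    (fun (st : List (String × String) × List String) l =>
      if l = "" then (st.1, [])
      else if st.2.length = 3 then st   -- the Python raises here (excluded by Pre_); the port keeps the state
      else (st.1 ++ st.2.map (fun p => (p, l)), st.2 ++ [l]))
    (([], []) : List (String × String) × List String)).1

-- ===== PRECONDITION & SPEC =====
-- Pre_ excludes exactly the inputs containing 4 consecutive nonempty lines (a group of
-- size > 3), on which the Python A raises (showerror/raise) and returns no value:
-- every suffix of the line list starts with at most 3 consecutive nonempty lines.
def Pre_parse_seperations (seperations_text : String) : Prop :=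
  ∀ i ∈ List.range ((PySem.Str.splitlines seperations_text).length),
    (((PySem.Str.splitlines seperations_text).drop i).takeWhile (fun x => x ≠ "")).length ≤ 3
instance (seperations_text : String) : Decidable (Pre_parse_seperations seperations_text) := by
  unfold Pre_parse_seperations; infer_instance

def pvWitness_parse_seperations : String := "alice\nbob\n\ncarol\ndave"

def Spec_parse_seperations (seperations_text : String) (out : List (String × String)) : Prop :=
  out = parse_seperations_alt seperations_text
instance (seperations_text : String) (out : List (String × String)) : Decidable (Spec_parse_seperations seperations_text out) := by unfold Spec_parse_seperations; infer_instance

-- ===== CLAIM (what is proved, stated in full; the proofs are below) =====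
def Claim_equal_parse_seperations : Prop := ∀ (seperations_text : String), Dom_parse_seperations seperations_text → Pre_parse_seperations seperations_text → Spec_parse_seperations seperations_text (parse_seperations seperations_text)

-- ===== LEMMAS AND PROOFS =====

-- proof-side version of Pre_ over the line list, quantified over all naturals
def pvP (lines : List String) : Prop :=
  ∀ i : Nat, ((lines.drop i).takeWhile (fun x => x ≠ "")).length ≤ 3

theorem pvPre_to_pvP (t : String) (h : Pre_parse_seperations t) :
    pvP (PySem.Str.splitlines t) := by
  intro i
  by_cases hi : i < (PySem.Str.splitlines t).length
  · exact h i (List.mem_range.mpr hi)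
  · rw [List.drop_eq_nil_of_le (Nat.le_of_not_lt hi)]; simp

theorem pvP_tail (l : String) (ls : List String) (h : pvP (l :: ls)) : pvP ls := by
  intro i; simpa [List.drop_succ_cons] using h (i + 1)

theorem pvP_head (lines : List String) (h : pvP lines) :
    (lines.takeWhile (fun x => x ≠ "")).length ≤ 3 := by
  simpa using h 0

-- the groups A's first loop (plus trailing flush) produces, from pending group g0
def pvGA : List String → List String → List (List String)
  | [], g0 => if g0 ≠ [] then [g0] else []
  | l :: ls, g0 => if l ≠ "" then pvGA ls (g0 ++ [l]) else g0 :: pvGA ls []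

-- per-group contribution to bad_pairs (oversized groups: A raises, the port skips)
def pvEmit (g : List String) : List (String × String) :=
  if g.length > 3 then [] else pvCombs2 g

-- the pairs B emits while scanning `lines` with current block `buf`
def pvE : List String → List String → List (String × String)
  | _, [] => []
  | buf, l :: ls =>
    if l = "" then pvE [] ls
    else buf.map (fun p => (p, l)) ++ pvE (buf ++ [l]) ls

theorem pvFoldA (lines : List String) :
    ∀ (gs0 : List (List String)) (g0 : List String),
      (let st := lines.foldl
        (fun (st : List (List String) × List String) l =>
          if l ≠ "" then (st.1, st.2 ++ [l]) else (st.1 ++ [st.2], [])) (gs0, g0)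
       if st.2 ≠ [] then st.1 ++ [st.2] else st.1)
      = gs0 ++ pvGA lines g0 := by
  induction lines with
  | nil => intro gs0 g0; by_cases h : g0 = [] <;> simp [pvGA, h]
  | cons l ls ih =>
    intro gs0 g0
    rw [List.foldl_cons]
    by_cases h : l = ""
    · rw [show (if l ≠ "" then ((gs0, g0).1, (gs0, g0).2 ++ [l]) else ((gs0, g0).1 ++ [(gs0, g0).2], ([] : List String))) = (gs0 ++ [g0], ([] : List String)) from by simp [h]]
      rw [ih (gs0 ++ [g0]) []]
      simp [pvGA, h]
    · rw [show (if l ≠ "" then ((gs0, g0).1, (gs0, g0).2 ++ [l]) else ((gs0, g0).1 ++ [(gs0, g0).2], ([] : List String))) = (gs0, g0 ++ [l]) from by simp [h]]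
      rw [ih gs0 (g0 ++ [l])]
      simp [pvGA, h]

theorem pvFoldEmit (gs : List (List String)) :
    ∀ acc, gs.foldl (fun acc g => if g.length > 3 then acc else acc ++ pvCombs2 g) acc
      = acc ++ gs.flatMap pvEmit := by
  induction gs with
  | nil => simp
  | cons g gs ih =>
    intro acc
    by_cases h : g.length > 3 <;> simp [h, ih, pvEmit]

-- appending one element to a block of size ≤ 2 extends its combination list on the right
theorem pvCombs2_snoc (b : List String) (x : String) (hb : b.length ≤ 2) :
    pvCombs2 (b ++ [x]) = pvCombs2 b ++ b.map (fun p => (p, x)) := by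
  match b, hb with
  | [], _ => simp [pvCombs2]
  | [a], _ => simp [pvCombs2]
  | [a, c], _ => simp [pvCombs2]

-- A's grouped emission equals B's streaming emission, block sizes capped at 3
theorem pvAE (lines : List String) :
    ∀ buf, pvP lines → buf.length + (lines.takeWhile (fun x => x ≠ "")).length ≤ 3 →
      (pvGA lines buf).flatMap pvEmit = pvCombs2 buf ++ pvE buf lines := by
  induction lines with
  | nil =>
    intro buf _ hlen
    simp only [List.takeWhile_nil, List.length_nil, Nat.add_zero] at hlen
    by_cases h : buf = []
    · simp [pvGA, pvE, h, pvCombs2]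
    · simp [pvGA, pvE, h, pvEmit, Nat.not_lt.mpr hlen]
  | cons l ls ih =>
    intro buf hP hlen
    by_cases h : l = ""
    · rw [show pvGA (l :: ls) buf = buf :: pvGA ls [] from by simp [pvGA, h]]
      rw [List.flatMap_cons]
      have hbuf : buf.length ≤ 3 := by
        rw [List.takeWhile_cons] at hlen; omega
      rw [ih [] (pvP_tail l ls hP) (by simpa using pvP_head ls (pvP_tail l ls hP))]
      simp [pvE, h, pvEmit, Nat.not_lt.mpr hbuf, pvCombs2]
    · rw [show pvGA (l :: ls) buf = pvGA ls (buf ++ [l]) from by simp [pvGA, h]]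
      rw [List.takeWhile_cons, if_pos (by simpa using h), List.length_cons] at hlen
      rw [ih (buf ++ [l]) (pvP_tail l ls hP) (by simp only [List.length_append, List.length_cons, List.length_nil]; omega)]
      rw [pvCombs2_snoc buf l (by omega)]
      simp [pvE, h]

-- B's fold computes the streaming emission (the raise branch never fires under pvP)
theorem pvFoldB (lines : List String) :
    ∀ (acc : List (String × String)) (buf : List String),
      pvP lines → buf.length + (lines.takeWhile (fun x => x ≠ "")).length ≤ 3 →
      (lines.foldl
        (fun (st : List (String × String) × List String) l =>
          if l = "" then (st.1, [])
          else if st.2.length = 3 then st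
          else (st.1 ++ st.2.map (fun p => (p, l)), st.2 ++ [l])) (acc, buf)).1
      = acc ++ pvE buf lines := by
  induction lines with
  | nil => intro acc buf _ _; simp [pvE]
  | cons l ls ih =>
    intro acc buf hP hlen
    rw [List.foldl_cons]
    by_cases h : l = ""
    · rw [show (if l = "" then ((acc, buf).1, ([] : List String))
            else if (acc, buf).2.length = 3 then (acc, buf)
            else ((acc, buf).1 ++ (acc, buf).2.map (fun p => (p, l)), (acc, buf).2 ++ [l]))
          = (acc, ([] : List String)) from by simp [h]]
      rw [ih acc [] (pvP_tail l ls hP) (by simpa using pvP_head ls (pvP_tail l ls hP))]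
      simp [pvE, h]
    · rw [List.takeWhile_cons, if_pos (by simpa using h), List.length_cons] at hlen
      rw [show (if l = "" then ((acc, buf).1, ([] : List String))
            else if (acc, buf).2.length = 3 then (acc, buf)
            else ((acc, buf).1 ++ (acc, buf).2.map (fun p => (p, l)), (acc, buf).2 ++ [l]))
          = (acc ++ buf.map (fun p => (p, l)), buf ++ [l]) from by
            simp [h, show ¬ buf.length = 3 by omega]]
      rw [ih (acc ++ buf.map (fun p => (p, l))) (buf ++ [l]) (pvP_tail l ls hP)
            (by simp only [List.length_append, List.length_cons, List.length_nil]; omega)]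
      simp [pvE, h]

-- ===== VERDICT (by name: the statement is the Claim_ definition above) =====
theorem parse_seperations_spec : Claim_equal_parse_seperations := by
  intro t _ hPre
  have hP := pvPre_to_pvP t hPre
  have hlen : (0 : Nat) + ((PySem.Str.splitlines t).takeWhile (fun x => x ≠ "")).length ≤ 3 := by
    simpa using pvP_head _ hP
  unfold Spec_parse_seperations parse_seperations parse_seperations_alt
  rw [pvFoldB (PySem.Str.splitlines t) [] [] hP (by simpa using hlen)]
  simp only [List.nil_append]
  rw [pvFoldEmit]
  have hA := pvFoldA (PySem.Str.splitlines t) [] []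
  simp only [List.nil_append] at hA
  rw [hA]
  rw [pvAE (PySem.Str.splitlines t) [] hP (by simpa using hlen)]
  simp [pvCombs2]
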